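-- pv_equiv track=rewrite | github.com/chongliujia/ragJ_platform | backend/app/api/api_v1/endpoints/semantic.py | _find_last_json_array
-- ===== SOURCE A (Python) =====
-- from typing import Any, Dict, List, Optional, Literal
--
-- def _find_last_json_array(raw: str) -> Optional[str]:
--     end = raw.rfind("]")
--     if end < 0:
--         return None
--     depth = 0
--     for idx in range(end, -1, -1):
--         ch = raw[idx]
--         if ch == "]":
--             depth += 1
--         elif ch == "[":
--             depth -= 1
--             if depth == 0:
--                 return raw[idx : end + 1]
--     return None
-- ===== SOURCE B (Python) =====
-- from typing import Optional
--
-- def _find_last_json_array(raw: str) -> Optional[str]: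
--     end = raw.rfind("]")
--     if end < 0:
--         return None
--     stack = []
--     match = None
--     for idx in range(end + 1):
--         ch = raw[idx]
--         if ch == "[":
--             stack.append(idx)
--         elif ch == "]":
--             match = stack.pop() if stack else None
--     return raw[match:end + 1] if match is not None else None
-- ===== Notes on version B (the rewrite author's own statement) =====
-- stated objective: alternative
-- what changed: Replaced A's backward scan with a depth counter by a single forward pass that stack-matches every bracket up to the last ']' and returns the opener popped for it (or None if that pop finds an empty stack).
import Mathlib
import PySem

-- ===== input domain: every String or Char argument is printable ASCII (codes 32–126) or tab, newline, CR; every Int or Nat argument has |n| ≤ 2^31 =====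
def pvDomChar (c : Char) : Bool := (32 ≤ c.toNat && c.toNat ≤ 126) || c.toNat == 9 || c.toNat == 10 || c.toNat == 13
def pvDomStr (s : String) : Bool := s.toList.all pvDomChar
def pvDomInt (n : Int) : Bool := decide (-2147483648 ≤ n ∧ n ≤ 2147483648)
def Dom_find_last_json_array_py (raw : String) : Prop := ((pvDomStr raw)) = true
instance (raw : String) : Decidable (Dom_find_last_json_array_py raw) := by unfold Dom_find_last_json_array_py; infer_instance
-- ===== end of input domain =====

-- B replaces A's backward depth-counter scan from the last ']' by a single forward pass
-- that stack-matches brackets; same O(n) cost, different traversal (objective: alternative).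

-- ===== PORT A =====
-- A's 'for idx in range(end, -1, -1)' loop: structural recursion on idx, depth as in A;
-- returns the index at which A returns, the slice raw[idx:end+1] is taken at the call site.
def pvALoop (l : List Char) : Nat → Int → Option Nat
  | idx, depth =>
    let ch := l.getD idx ' '
    if ch = ']' then
      match idx with
      | 0 => none
      | i+1 => pvALoop l i (depth+1)
    else if ch = '[' then
      if depth - 1 = 0 then some idx
      else match idx with
        | 0 => none
        | i+1 => pvALoop l i (depth-1)
    else
      match idx with
      | 0 => none
      | i+1 => pvALoop l i depth

def find_last_json_array_py (raw : String) : Option String :=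
  let e := PySem.Str.rfind raw "]"
  if e < 0 then none
  else
    match pvALoop raw.toList e.toNat 0 with
    | some i => some (PySem.Str.slice raw (some (i : Int)) (some (e + 1)))
    | none => none

-- ===== PORT B =====
-- B's forward loop over raw[:end+1]: stack of '[' indices (top = head), match := pop at each ']'.
def pvBLoop : List Char → Nat → List Nat → Option Nat → Option Nat
  | [], _, _, m => m
  | c :: rest, idx, stack, m =>
    if c = '[' then pvBLoop rest (idx+1) (idx :: stack) m
    else if c = ']' then
      match stack with
      | [] => pvBLoop rest (idx+1) [] none
      | t :: st => pvBLoop rest (idx+1) st (some t)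
    else pvBLoop rest (idx+1) stack m

def find_last_json_array_py_alt (raw : String) : Option String :=
  let e := PySem.Str.rfind raw "]"
  if e < 0 then none
  else
    match pvBLoop (raw.toList.take (e.toNat + 1)) 0 [] none with
    | some i => some (PySem.Str.slice raw (some (i : Int)) (some (e + 1)))
    | none => none

-- ===== PRECONDITION & SPEC =====
def Spec_find_last_json_array_py (raw : String) (out : Option String) : Prop := out = find_last_json_array_py_alt raw
instance (raw : String) (out : Option String) : Decidable (Spec_find_last_json_array_py raw out) := by unfold Spec_find_last_json_array_py; infer_instance

-- ===== CLAIM (what is proved, stated in full; the proofs are below) =====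
def Claim_equal_find_last_json_array_py : Prop := ∀ (raw : String), Dom_find_last_json_array_py raw → Spec_find_last_json_array_py raw (find_last_json_array_py raw)

-- ===== LEMMAS AND PROOFS =====

-- the stack after B's forward pass over t, starting at index idx with stack st
def pvStack : List Char → Nat → List Nat → List Nat
  | [], _, st => st
  | c :: rest, idx, st =>
    if c = '[' then pvStack rest (idx+1) (idx :: st)
    else if c = ']' then pvStack rest (idx+1) st.tail
    else pvStack rest (idx+1) st

theorem pvBLoop_append_rbracket (t : List Char) :
    ∀ (idx : Nat) (st : List Nat) (m : Option Nat),
      pvBLoop (t ++ [']']) idx st m = (pvStack t idx st).head? := by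
  induction t with
  | nil =>
    intro idx st m
    cases st <;> simp [pvBLoop, pvStack]
  | cons c rest ih =>
    intro idx st m
    by_cases h1 : c = '['
    · simp [pvBLoop, pvStack, h1, ih]
    · by_cases h2 : c = ']'
      · cases st <;> simp [pvBLoop, pvStack, h1, h2, ih, List.tail]
      · simp [pvBLoop, pvStack, h1, h2, ih]

theorem pvStack_append (t u : List Char) :
    ∀ (idx : Nat) (st : List Nat),
      pvStack (t ++ u) idx st = pvStack u (idx + t.length) (pvStack t idx st) := by
  induction t with
  | nil => intro idx st; simp [pvStack]
  | cons c rest ih =>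
    intro idx st
    by_cases h1 : c = '['
    · simp [pvStack, h1, ih]; ring_nf
    · by_cases h2 : c = ']'
      · simp [pvStack, h1, h2, ih]; ring_nf
      · simp [pvStack, h1, h2, ih]; ring_nf

-- A's backward scan at index k with depth d ≥ 1 returns the d-th element from the top of
-- the forward stack over the prefix ending at k.
theorem pvALoop_eq_stack (l : List Char) :
    ∀ (k : Nat) (d : Int), 1 ≤ d → k < l.length →
      pvALoop l k d = (pvStack (l.take (k+1)) 0 [])[(d-1).toNat]? := by
  intro k
  induction k with
  | zero =>
    intro d hd hk
    obtain ⟨c, hc⟩ : ∃ c, l[0]? = some c := ⟨l[0], List.getElem?_eq_getElem hk⟩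
    have htake : l.take 1 = [c] := by rw [List.take_add_one]; simp [hc]
    rw [htake]
    by_cases h1 : c = ']'
    · simp [pvALoop, hc, h1, pvStack]
    · by_cases h2 : c = '['
      · by_cases hd1 : d = 1
        · simp [pvALoop, hc, h1, h2, hd1, pvStack]
        · have hne : ¬ ((d:Int) - 1 = 0) := by omega
          simp [pvALoop, hc, h1, h2, hne, pvStack]
          omega
      · simp [pvALoop, hc, h1, h2, pvStack]
  | succ k ih =>
    intro d hd hk
    have hk' : k < l.length := by omega
    obtain ⟨c, hc⟩ : ∃ c, l[k+1]? = some c := ⟨l[k+1], List.getElem?_eq_getElem hk⟩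
    have htake : l.take (k+2) = l.take (k+1) ++ [c] := by
      rw [List.take_add_one]; simp [hc]
    have hlen : (l.take (k+1)).length = k+1 := by simp; omega
    rw [show k+1+1 = k+2 from rfl, htake, pvStack_append, hlen]
    by_cases h1 : c = ']'
    · have hA : pvALoop l (k+1) d = pvALoop l k (d+1) := by simp [pvALoop, hc, h1]
      rw [hA, ih (d+1) (by omega) hk']
      simp [h1, pvStack, List.getElem?_tail]
      congr 1
      omega
    · by_cases h2 : c = '['
      · by_cases hd1 : d = 1
        · have hA : pvALoop l (k+1) d = some (k+1) := by
            simp [pvALoop, hc, h1, h2, hd1]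
          rw [hA]
          simp [h2, pvStack, hd1]
        · have hne : ¬ ((d:Int) - 1 = 0) := by omega
          have hA : pvALoop l (k+1) d = pvALoop l k (d-1) := by
            simp [pvALoop, hc, h1, h2, hne]
          rw [hA, ih (d-1) (by omega) hk']
          simp [h2, pvStack]
          rw [show d.toNat - 1 = (d.toNat - 1 - 1) + 1 by omega]
          simp
      · have hA : pvALoop l (k+1) d = pvALoop l k d := by simp [pvALoop, hc, h1, h2]
        rw [hA, ih d hd hk']
        simp [h1, h2, pvStack]

-- rfind's recursor: the character at a non-negative result of rfind(…, "]") is ']'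
theorem pvRfindGo_bracket (s : List Char) :
    ∀ (k : Nat), 0 ≤ PySem.Chars.rfind.go s [']'] k →
      s[(PySem.Chars.rfind.go s [']'] k).toNat]? = some ']' := by
  intro k
  induction k with
  | zero =>
    intro h
    by_cases hp : List.isPrefixOf [']'] s
    · cases s with
      | nil => simp [List.isPrefixOf] at hp
      | cons a as =>
        simp [List.isPrefixOf] at hp
        subst hp
        simp [PySem.Chars.rfind.go, List.isPrefixOf]
    · simp [PySem.Chars.rfind.go, hp] at h ⊢
  | succ j ih =>
    intro h
    by_cases hp : List.isPrefixOf [']'] (s.drop (j+1))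
    · have : ∃ rest, s.drop (j+1) = ']' :: rest := by
        cases hdrop : s.drop (j+1) with
        | nil => rw [hdrop] at hp; simp [List.isPrefixOf] at hp
        | cons a as =>
          rw [hdrop] at hp; simp [List.isPrefixOf] at hp
          exact ⟨as, by rw [hp]⟩
      obtain ⟨rest, hrest⟩ := this
      have hidx : s[j+1]? = some ']' := by
        have h1 : (s.drop (j+1))[0]? = some ']' := by rw [hrest]; rfl
        rw [List.getElem?_drop] at h1
        simpa using h1
      simp [PySem.Chars.rfind.go, hp, hidx]
    · have hgo : PySem.Chars.rfind.go s [']'] (j+1) = PySem.Chars.rfind.go s [']'] j := by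
        simp [PySem.Chars.rfind.go, hp]
      rw [hgo] at h ⊢
      exact ih h

-- ===== VERDICT (by name: the statement is the Claim_ definition above) =====
theorem find_last_json_array_py_spec : Claim_equal_find_last_json_array_py := by
  unfold Claim_equal_find_last_json_array_py Spec_find_last_json_array_py
  intro raw _
  unfold find_last_json_array_py find_last_json_array_py_alt
  by_cases he : PySem.Str.rfind raw "]" < 0
  · rw [if_pos he, if_pos he]
  · rw [if_neg he, if_neg he]
    have h0 : (0:Int) ≤ PySem.Str.rfind raw "]" := by omega
    have hrf : PySem.Str.rfind raw "]" = PySem.Chars.rfind raw.toList [']'] := by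
      rw [PySem.Str.rfind_eq]; rfl
    have hch : raw.toList[(PySem.Str.rfind raw "]").toNat]? = some ']' := by
      rw [hrf] at h0 ⊢
      exact pvRfindGo_bracket raw.toList raw.toList.length h0
    generalize (PySem.Str.rfind raw "]").toNat = n at hch ⊢
    have hnlen : n < raw.toList.length := (List.getElem?_eq_some_iff.1 hch).1
    have htake : raw.toList.take (n+1) = raw.toList.take n ++ [']'] := by
      rw [List.take_add_one]; simp [hch]
    have hB : pvBLoop (raw.toList.take (n+1)) 0 [] none
        = (pvStack (raw.toList.take n) 0 []).head? := by
      rw [htake, pvBLoop_append_rbracket]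
    have hAB : pvALoop raw.toList n 0 = pvBLoop (raw.toList.take (n+1)) 0 [] none := by
      cases n with
      | zero =>
        rw [hB]
        simp [pvALoop, hch, pvStack]
      | succ k =>
        have hA : pvALoop raw.toList (k+1) 0 = pvALoop raw.toList k 1 := by
          simp [pvALoop, hch]
        rw [hA, pvALoop_eq_stack raw.toList k 1 (by omega) (by omega), hB]
        simp [List.head?_eq_getElem?]
    rw [hAB]
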